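-- pv_equiv track=rewrite | github.com/SlonZerion/Telegram_All_Subs_parser | main.py | search_queries
-- ===== SOURCE A (Python) =====
-- import itertools
--
-- def search_queries(count_symbol=2):
--     alphabets = [
--         "qwertyuiopasdfghjklzxcvbnm",
--         "йцукенгшщзхъёфывапролджэячсмитьбю",
--         "1234567890",
--     ]
--
--     for alphabet in alphabets:
--         for pair in itertools.permutations(alphabet, count_symbol):
--             yield "".join(pair)
-- ===== SOURCE B (Python) =====
-- def search_queries(count_symbol=2):
--     alphabets = [
--         "qwertyuiopasdfghjklzxcvbnm",
--         "йцукенгшщзхъёфывапролджэячсмитьбю",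
--         "1234567890",
--     ]
--     for alphabet in alphabets:
--         if count_symbol > len(alphabet):
--             continue  # no arrangement that long exists
--         # breadth-first: grow all partial arrangements one position at a time
--         level = [("", alphabet)]
--         for _ in range(count_symbol):
--             level = [(chosen + c, rest[:i] + rest[i + 1:])
--                      for chosen, rest in level
--                      for i, c in enumerate(rest)]
--         for chosen, _ in level:
--             yield chosen
-- ===== Notes on version B (the rewrite author's own statement) =====
-- stated objective: alternative
-- what changed: Replaces itertools.permutations (recursive index machinery consumed lazily per result) with an iterative breadth-first pass that keeps the whole level of (prefix, remaining-characters) pairs and extends every prefix by one position per round, joining at the end.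
import Mathlib
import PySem

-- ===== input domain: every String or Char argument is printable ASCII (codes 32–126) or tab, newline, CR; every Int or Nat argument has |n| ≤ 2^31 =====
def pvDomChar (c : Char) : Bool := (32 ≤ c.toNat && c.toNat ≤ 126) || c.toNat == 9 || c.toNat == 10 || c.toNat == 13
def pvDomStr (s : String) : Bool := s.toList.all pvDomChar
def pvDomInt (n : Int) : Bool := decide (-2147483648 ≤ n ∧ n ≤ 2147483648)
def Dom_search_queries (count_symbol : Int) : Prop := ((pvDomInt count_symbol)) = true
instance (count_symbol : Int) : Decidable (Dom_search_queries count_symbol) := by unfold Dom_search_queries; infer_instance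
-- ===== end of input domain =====

-- B replaces itertools.permutations by an iterative breadth-first level expansion (alternative
-- decomposition, same cost); equivalence is about the list of yielded strings.

def pvAlphabets : List String :=
  ["qwertyuiopasdfghjklzxcvbnm",
   "йцукенгшщзхъёфывапролджэячсмитьбю",
   "1234567890"]

-- ===== PORT A =====
-- itertools.permutations(s, r): pick each still-available element (positions kept in order),
-- recurse on the rest; this is the documented lexicographic-by-index order.
def picksA : List Char → List (Char × List Char)
  | [] => []
  | c :: cs => (c, cs) :: (picksA cs).map (fun p => (p.1, c :: p.2))

def permsA : Nat → List Char → List (List Char)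
  | 0, _ => [[]]
  | Nat.succ r, pool => (picksA pool).flatMap (fun q => (permsA r q.2).map (fun t => q.1 :: t))

-- negative count_symbol raises ValueError in Python (excluded by Pre_); .toNat is unreached there.
-- itertools.permutations returns immediately when r > n (its documented first step); hence the guard.
def search_queries (count_symbol : Int) : List String :=
  pvAlphabets.flatMap (fun alphabet =>
    if (alphabet.toList.length : Int) < count_symbol then []
    else (permsA count_symbol.toNat alphabet.toList).map (fun pair => String.mk pair))

-- ===== PORT B =====
-- Python strings are modeled by their character lists; rest[:i] + rest[i+1:] with the in-range
-- index i from enumerate is exactly List.eraseIdx i, and chosen + c appends one character.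
def stepB (level : List (List Char × List Char)) : List (List Char × List Char) :=
  level.flatMap (fun pr =>
    (PySem.List.enumerate pr.2).map (fun ic => (pr.1 ++ [ic.2], pr.2.eraseIdx ic.1.toNat)))

def loopB : Nat → List (List Char × List Char) → List (List Char × List Char)
  | 0, level => level
  | Nat.succ n, level => loopB n (stepB level)

def search_queries_alt (count_symbol : Int) : List String :=
  pvAlphabets.flatMap (fun alphabet =>
    if (alphabet.toList.length : Int) < count_symbol then []
    else (loopB count_symbol.toNat [([], alphabet.toList)]).map (fun pr => String.mk pr.1))

-- ===== PRECONDITION & SPEC =====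
-- Pre_ excludes only negative count_symbol, on which A (itertools.permutations) raises ValueError.
def Pre_search_queries (count_symbol : Int) : Prop := 0 ≤ count_symbol
instance (count_symbol : Int) : Decidable (Pre_search_queries count_symbol) := by
  unfold Pre_search_queries; infer_instance

def pvWitness_search_queries : Int := (2)

def Spec_search_queries (count_symbol : Int) (out : List String) : Prop := out = search_queries_alt count_symbol
instance (count_symbol : Int) (out : List String) : Decidable (Spec_search_queries count_symbol out) := by unfold Spec_search_queries; infer_instance

-- ===== CLAIM (what is proved, stated in full; the proofs are below) =====
def Claim_equal_search_queries : Prop := ∀ (count_symbol : Int), Dom_search_queries count_symbol → Pre_search_queries count_symbol → Spec_search_queries count_symbol (search_queries count_symbol)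

-- ===== LEMMAS AND PROOFS =====

theorem picks_eq_aux (cs : List Char) : ∀ (ctx : List Char),
    (PySem.List.enumerate cs (ctx.length : Int)).map
        (fun ic => (ic.2, (ctx ++ cs).eraseIdx ic.1.toNat))
      = (picksA cs).map (fun q => (q.1, ctx ++ q.2)) := by
  induction cs with
  | nil => intro ctx; simp [PySem.List.enumerate_nil, picksA]
  | cons c cs ih =>
    intro ctx
    rw [PySem.List.enumerate_cons, List.map_cons]
    have hhead : ((ctx ++ c :: cs).eraseIdx ((ctx.length : Int)).toNat) = ctx ++ cs := by
      rw [Int.toNat_natCast, List.eraseIdx_append_of_length_le (le_refl _)]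
      simp
    have hstart : (ctx.length : Int) + 1 = ((ctx ++ [c]).length : Int) := by
      simp
    have hlist : ctx ++ c :: cs = (ctx ++ [c]) ++ cs := by simp
    rw [hhead, hstart, hlist, ih (ctx ++ [c])]
    simp [picksA, List.map_map, Function.comp]
  
theorem picks_eq (rest : List Char) :
    (PySem.List.enumerate rest).map (fun ic => (ic.2, rest.eraseIdx ic.1.toNat)) = picksA rest := by
  have h := picks_eq_aux rest []
  simpa using h

theorem loop_perm (r : Nat) : ∀ (level : List (List Char × List Char)),
    (loopB r level).map Prod.fst
      = level.flatMap (fun pr => (permsA r pr.2).map (fun t => pr.1 ++ t)) := by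
  induction r with
  | zero =>
    intro level
    simp [loopB, permsA, ← List.map_eq_flatMap]
  | succ r ih =>
    intro level
    rw [show loopB (Nat.succ r) level = loopB r (stepB level) from rfl, ih]
    unfold stepB
    rw [List.flatMap_assoc]
    refine List.flatMap_congr (fun pr _ => ?_)
    have hmap : (PySem.List.enumerate pr.2).map
          (fun ic => (pr.1 ++ [ic.2], pr.2.eraseIdx ic.1.toNat))
        = (picksA pr.2).map (fun q => (pr.1 ++ [q.1], q.2)) := by
      rw [← picks_eq pr.2, List.map_map]; rfl
    rw [hmap, List.flatMap_map]
    conv_rhs => rw [show permsA (Nat.succ r) pr.2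
      = (picksA pr.2).flatMap (fun q => (permsA r q.2).map (fun t => q.1 :: t)) from rfl]
    rw [List.map_flatMap]
    refine List.flatMap_congr (fun q _ => ?_)
    simp [List.map_map, Function.comp_def]

theorem per_alpha (r : Nat) (a : List Char) :
    (loopB r [([], a)]).map (fun pr => String.mk pr.1) = (permsA r a).map String.mk := by
  have h : (loopB r [([], a)]).map (fun pr => String.mk pr.1)
      = ((loopB r [([], a)]).map Prod.fst).map String.mk := by
    rw [List.map_map]; rfl
  rw [h, loop_perm r [([], a)]]
  simp

theorem mainpt (c : Int) (a : String) :
    (if ((a.toList.length : Int) < c) then ([] : List String)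
     else (loopB c.toNat [([], a.toList)]).map (fun pr => String.mk pr.1))
      = (if ((a.toList.length : Int) < c) then ([] : List String)
     else (permsA c.toNat a.toList).map String.mk) := by
  split_ifs with h
  · rfl
  · exact per_alpha _ _

-- ===== VERDICT (by name: the statement is the Claim_ definition above) =====
theorem search_queries_spec : Claim_equal_search_queries := by
  intro c _ _
  unfold Spec_search_queries search_queries search_queries_alt
  refine (List.flatMap_congr (fun a _ => ?_)).symm
  exact mainpt c a
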